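-- pv_equiv track=rewrite | github.com/PiergiorgioMassa/abft_load | stable_sfs_deterministic.py | choose_ann_entry
-- ===== SOURCE A (Python) =====
-- IMPACT_RANK = {"HIGH": 3, "MODERATE": 2, "LOW": 1, "MODIFIER": 0}
--
-- def split_ann_entry(entry):
--     parts = entry.split('|')
--     if len(parts) < 3: parts += [""]*(3-len(parts))
--     annotation = parts[1] if len(parts) > 1 else ""
--     impact     = parts[2] if len(parts) > 2 else ""
--     trailing   = parts[-1] if parts else ""
--     return annotation, impact, trailing
--
-- def choose_ann_entry(ann_list, mode):
--     if not ann_list: return None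
--     anns = list(ann_list)
--     if mode == "first":
--         return anns[0]
--     elif mode == "canonical":
--         for e in anns:
--             ann, imp, tail = split_ann_entry(e)
--             if "CANONICAL" in tail: return e
--         return anns[0]
--     elif mode == "worst":
--         # Se presente intergenic, è la più "bassa" come priorità di filtro (qui manteniamo compat)
--         for e in anns:
--             ann, imp, tail = split_ann_entry(e)
--             if ann == "intergenic_region": return e
--         best_e, best_rank = None, -1
--         for e in anns:
--             ann, imp, tail = split_ann_entry(e)
--             r = IMPACT_RANK.get(imp, -1)
--             if r > best_rank:
--                 best_e, best_rank = e, r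
--         return best_e
--     return None
-- ===== SOURCE B (Python) =====
-- IMPACT_RANK = {"HIGH": 3, "MODERATE": 2, "LOW": 1, "MODIFIER": 0}
--
-- def _priority(mode, entry):
--     parts = entry.split('|')
--     if mode == "first":
--         return 0
--     if mode == "canonical":
--         tail = parts[-1] if len(parts) > 2 else ""
--         return 1 if "CANONICAL" in tail else 0
--     ann = parts[1] if len(parts) > 1 else ""
--     if ann == "intergenic_region":
--         return 4
--     imp = parts[2] if len(parts) > 2 else ""
--     return IMPACT_RANK.get(imp, -1)
--
-- def choose_ann_entry(ann_list, mode):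
--     if mode not in ("first", "canonical", "worst"):
--         return None
--     cands = [e for e in ann_list if _priority(mode, e) >= 0]
--     if not cands:
--         return None
--     return max(cands, key=lambda e: _priority(mode, e))
-- ===== Notes on version B (the rewrite author's own statement) =====
-- stated objective: alternative
-- what changed: The three mode-specific scanning branches (head, early-return canonical scan, and two sequential 'worst' scans with a running-best fold) are replaced by one uniform scheme: a per-mode integer priority function, a filter keeping non-negative-priority entries, and a single first-argmax (Python max with key) over the survivors.
import Mathlib
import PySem

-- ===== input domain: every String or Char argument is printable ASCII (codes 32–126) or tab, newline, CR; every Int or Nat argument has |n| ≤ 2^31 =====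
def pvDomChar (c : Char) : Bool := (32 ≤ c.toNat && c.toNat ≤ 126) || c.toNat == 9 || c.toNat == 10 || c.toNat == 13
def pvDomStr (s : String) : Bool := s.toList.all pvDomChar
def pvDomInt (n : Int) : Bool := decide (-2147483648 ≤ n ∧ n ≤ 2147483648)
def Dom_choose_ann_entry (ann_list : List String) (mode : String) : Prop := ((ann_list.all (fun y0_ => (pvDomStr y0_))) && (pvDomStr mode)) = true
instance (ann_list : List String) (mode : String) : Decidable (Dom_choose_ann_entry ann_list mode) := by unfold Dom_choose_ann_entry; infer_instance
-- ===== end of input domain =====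

-- B replaces A's three mode-specific scans by one per-mode priority function, a non-negative filter and a single first-argmax (alternative decomposition, same cost).

-- ===== PORT A =====
-- module-level constant shared by both Pythons
def impactRank : PySem.Dict String Int :=
  PySem.Dict.ofList [("HIGH", 3), ("MODERATE", 2), ("LOW", 1), ("MODIFIER", 0)]

-- port of split_ann_entry (pad-to-3 then index, as in A)
def splitAnnEntry (entry : String) : String × String × String :=
  let parts := (PySem.Str.split? entry "|").getD []
  let parts := if parts.length < 3 then parts ++ List.replicate (3 - parts.length) "" else parts
  let annotation := if parts.length > 1 then PySem.List.pyGetD parts 1 "" else ""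
  let impact := if parts.length > 2 then PySem.List.pyGetD parts 2 "" else ""
  let trailing := if parts ≠ [] then PySem.List.pyGetD parts (-1) "" else ""
  (annotation, impact, trailing)

-- A's 'canonical' loop: early return on "CANONICAL" in tail
def findCanonA : List String → Option String
  | [] => none
  | e :: rest => if PySem.Str.isIn "CANONICAL" (splitAnnEntry e).2.2 then some e else findCanonA rest

-- A's first 'worst' loop: early return on annotation == "intergenic_region"
def findInterA : List String → Option String
  | [] => none
  | e :: rest => if (splitAnnEntry e).1 == "intergenic_region" then some e else findInterA rest

-- A's second 'worst' loop body: keep first entry of strictly greater rank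
def bestStepA (st : Option String × Int) (e : String) : Option String × Int :=
  let r := PySem.Dict.getD impactRank (splitAnnEntry e).2.1 (-1)
  if r > st.2 then (some e, r) else st

def choose_ann_entry (ann_list : List String) (mode : String) : Option String :=
  if ann_list = [] then none
  else
    let anns := ann_list
    if mode == "first" then PySem.List.pyGet? anns 0
    else if mode == "canonical" then
      match findCanonA anns with
      | some e => some e
      | none => PySem.List.pyGet? anns 0
    else if mode == "worst" then
      match findInterA anns with
      | some e => some e
      | none => (anns.foldl bestStepA (none, -1)).1
    else none

-- ===== PORT B =====
-- B's _priority(mode, entry): one integer score per mode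
def prioB (mode entry : String) : Int :=
  let parts := (PySem.Str.split? entry "|").getD []
  if mode == "first" then 0
  else if mode == "canonical" then
    let tail := if parts.length > 2 then PySem.List.pyGetD parts (-1) "" else ""
    if PySem.Str.isIn "CANONICAL" tail then 1 else 0
  else
    let ann := if parts.length > 1 then PySem.List.pyGetD parts 1 "" else ""
    if ann == "intergenic_region" then 4
    else
      let imp := if parts.length > 2 then PySem.List.pyGetD parts 2 "" else ""
      PySem.Dict.getD impactRank imp (-1)

def choose_ann_entry_alt (ann_list : List String) (mode : String) : Option String :=
  if (mode == "first" || mode == "canonical" || mode == "worst") = false then none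
  else
    let cands := ann_list.filter (fun e => decide (0 ≤ prioB mode e))
    if cands = [] then none
    else PySem.List.max? cands (prioB mode)

-- ===== PRECONDITION & SPEC =====
def Spec_choose_ann_entry (ann_list : List String) (mode : String) (out : Option String) : Prop := out = choose_ann_entry_alt ann_list mode
instance (ann_list : List String) (mode : String) (out : Option String) : Decidable (Spec_choose_ann_entry ann_list mode out) := by unfold Spec_choose_ann_entry; infer_instance

-- ===== CLAIM (what is proved, stated in full; the proofs are below) =====
def Claim_equal_choose_ann_entry : Prop := ∀ (ann_list : List String) (mode : String), Dom_choose_ann_entry ann_list mode → Spec_choose_ann_entry ann_list mode (choose_ann_entry ann_list mode)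

-- ===== LEMMAS AND PROOFS =====

-- abbreviation for the max?-fold step
def mstep (key : String → Int) (acc : Option String) (x : String) : Option String :=
  match acc with
  | none => some x
  | some m => if key m < key x then some x else some m

theorem max?_eq_foldl_mstep (l : List String) (key : String → Int) :
    PySem.List.max? l key = l.foldl (mstep key) none := by
  unfold PySem.List.max?
  congr 1
  funext acc x
  cases acc <;> simp [mstep]

-- the rank lookup takes one of five values
theorem rank_cases (s : String) :
    PySem.Dict.getD impactRank s (-1) = 3 ∨ PySem.Dict.getD impactRank s (-1) = 2 ∨
    PySem.Dict.getD impactRank s (-1) = 1 ∨ PySem.Dict.getD impactRank s (-1) = 0 ∨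
    PySem.Dict.getD impactRank s (-1) = -1 := by
  simp [impactRank, PySem.Dict.getD, PySem.Dict.get?, PySem.Dict.ofList,
    PySem.Dict.empty, PySem.Dict.update, PySem.Dict.insert, List.find?]
  cases "HIGH" == s <;> cases "MODERATE" == s <;> cases "LOW" == s <;>
    cases "MODIFIER" == s <;> simp

theorem rank_bounds (s : String) :
    -1 ≤ PySem.Dict.getD impactRank s (-1) ∧ PySem.Dict.getD impactRank s (-1) ≤ 3 := by
  rcases rank_cases s with h | h | h | h | h <;> rw [h] <;> omega

-- constant key: the fold keeps its first element
theorem foldl_mstep_const (l : List String) (m : String) (key : String → Int)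
    (hc : ∀ e ∈ l, key e ≤ key m) : l.foldl (mstep key) (some m) = some m := by
  induction l with
  | nil => rfl
  | cons x r ih =>
    have hx := hc x (by simp)
    simp only [List.foldl_cons, mstep, if_neg (by omega : ¬ key m < key x)]
    exact ih (fun e he => hc e (by simp [he]))

theorem prio_first (e : String) : prioB "first" e = 0 := by rfl

theorem prio_canon (e : String) :
    prioB "canonical" e = if PySem.Str.isIn "CANONICAL" (splitAnnEntry e).2.2 then 1 else 0 := by
  unfold prioB splitAnnEntry
  generalize (PySem.Str.split? e "|").getD [] = parts
  rcases parts with _ | ⟨a, _ | ⟨b, _ | ⟨c, rest⟩⟩⟩ <;>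
    simp [PySem.List.pyGetD, PySem.List.pyGet?, PySem.List.pyIdx?]

theorem prio_worst (e : String) :
    prioB "worst" e = if (splitAnnEntry e).1 == "intergenic_region" then 4
      else PySem.Dict.getD impactRank (splitAnnEntry e).2.1 (-1) := by
  unfold prioB splitAnnEntry
  generalize (PySem.Str.split? e "|").getD [] = parts
  rcases parts with _ | ⟨a, _ | ⟨b, _ | ⟨c, rest⟩⟩⟩ <;>
    simp [PySem.List.pyGetD, PySem.List.pyGet?, PySem.List.pyIdx?]

theorem prio_canon_le_one (e : String) : prioB "canonical" e ≤ 1 := by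
  rw [prio_canon]; split_ifs <;> omega

theorem prio_worst_le_four (e : String) : prioB "worst" e ≤ 4 := by
  rw [prio_worst]; split_ifs with h
  · omega
  · exact le_trans (rank_bounds _).2 (by omega)

-- canonical: the fold with a priority-0 accumulator is A's early-return scan
theorem canon_fold (l : List String) (m : String) (hm : prioB "canonical" m = 0) :
    l.foldl (mstep (prioB "canonical")) (some m) =
      match findCanonA l with
      | some e => some e
      | none => some m := by
  induction l generalizing m with
  | nil => rfl
  | cons x r ih =>
    by_cases hx : PySem.Str.isIn "CANONICAL" (splitAnnEntry x).2.2 = true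
    · have hpx : prioB "canonical" x = 1 := by rw [prio_canon, if_pos hx]
      simp only [List.foldl_cons, mstep, hm, hpx, if_pos (by omega : (0:Int) < 1),
        findCanonA, if_pos hx]
      exact foldl_mstep_const r x _ (fun e _ => by rw [hpx]; exact prio_canon_le_one e)
    · have hpx : prioB "canonical" x = 0 := by rw [prio_canon, if_neg hx]
      simp only [List.foldl_cons, mstep, hm, hpx, if_neg (by omega : ¬ (0:Int) < 0),
        findCanonA, if_neg hx]
      exact ih m hm

-- worst: an intergenic entry ahead wins over any accumulator of priority < 4
theorem worst_fold_inter (l : List String) (m : String) (hm : prioB "worst" m < 4)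
    (e : String) (he : findInterA l = some e) :
    l.foldl (mstep (prioB "worst")) (some m) = some e := by
  induction l generalizing m with
  | nil => simp [findInterA] at he
  | cons x r ih =>
    by_cases hx : ((splitAnnEntry x).1 == "intergenic_region") = true
    · have hpx : prioB "worst" x = 4 := by rw [prio_worst, if_pos hx]
      rw [findInterA, if_pos hx] at he
      injection he with hxe
      subst hxe
      simp only [List.foldl_cons, mstep, hpx, if_pos (by omega : prioB "worst" m < 4)]
      exact foldl_mstep_const r x _ (fun y _ => by rw [hpx]; exact prio_worst_le_four y)
    · have hpx : prioB "worst" x < 4 := by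
        rw [prio_worst, if_neg hx]; exact lt_of_le_of_lt (rank_bounds _).2 (by omega)
      rw [findInterA, if_neg hx] at he
      simp only [List.foldl_cons, mstep]
      split_ifs
      · exact ih x hpx he
      · exact ih m hm he

-- worst, no intergenic anywhere: A's running-best fold = B's filtered argmax fold
theorem worst_fold_best (l : List String) (hni : ∀ x ∈ l, ¬ ((splitAnnEntry x).1 == "intergenic_region") = true) :
    (∀ (m : String), 0 ≤ prioB "worst" m →
      prioB "worst" m = PySem.Dict.getD impactRank (splitAnnEntry m).2.1 (-1) →
      (l.foldl bestStepA (some m, prioB "worst" m)).1 =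
        (l.filter (fun e => decide (0 ≤ prioB "worst" e))).foldl (mstep (prioB "worst")) (some m)) ∧
    (l.foldl bestStepA (none, -1)).1 =
      (l.filter (fun e => decide (0 ≤ prioB "worst" e))).foldl (mstep (prioB "worst")) none := by
  induction l with
  | nil => exact ⟨fun m _ _ => rfl, rfl⟩
  | cons x r ih =>
    have hxni := hni x (by simp)
    have ihr := ih (fun y hy => hni y (by simp [hy]))
    have hpx : prioB "worst" x = PySem.Dict.getD impactRank (splitAnnEntry x).2.1 (-1) := by
      rw [prio_worst, if_neg hxni]
    constructor
    · intro m hm hmr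
      simp only [List.foldl_cons, bestStepA, ← hpx]
      by_cases hgt : prioB "worst" m < prioB "worst" x
      · have hx0 : (0:Int) ≤ prioB "worst" x := le_trans hm (le_of_lt hgt)
        rw [if_pos (by omega), List.filter_cons_of_pos (by simpa using hx0),
          List.foldl_cons, mstep, if_pos hgt]
        exact ihr.1 x hx0 hpx
      · rw [if_neg (by omega)]
        by_cases hx0 : (0:Int) ≤ prioB "worst" x
        · rw [List.filter_cons_of_pos (by simpa using hx0), List.foldl_cons, mstep,
            if_neg hgt]
          exact ihr.1 m hm hmr
        · rw [List.filter_cons_of_neg (by simpa using hx0)]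
          exact ihr.1 m hm hmr
    · simp only [List.foldl_cons, bestStepA, ← hpx]
      by_cases hx0 : (0:Int) ≤ prioB "worst" x
      · rw [if_pos (by omega), List.filter_cons_of_pos (by simpa using hx0),
          List.foldl_cons]
        exact ihr.1 x hx0 hpx
      · rw [if_neg (by omega), List.filter_cons_of_neg (by simpa using hx0)]
        exact ihr.2

theorem findInterA_none_iff (l : List String) :
    findInterA l = none ↔ ∀ x ∈ l, ¬ ((splitAnnEntry x).1 == "intergenic_region") = true := by
  induction l with
  | nil => simp [findInterA]
  | cons x r ih =>
    rw [findInterA]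
    by_cases hx : ((splitAnnEntry x).1 == "intergenic_region") = true
    · rw [if_pos hx]
      constructor
      · intro h; cases h
      · intro h; exact absurd hx (h x (by simp))
    · rw [if_neg hx, ih]
      constructor
      · intro h y hy
        rcases List.mem_cons.mp hy with rfl | hy'
        · exact hx
        · exact h y hy'
      · intro h y hy; exact h y (by simp [hy])

theorem findInterA_filter (l : List String) :
    findInterA (l.filter (fun e => decide (0 ≤ prioB "worst" e))) = findInterA l := by
  induction l with
  | nil => rfl
  | cons x r ih =>
    by_cases hx : ((splitAnnEntry x).1 == "intergenic_region") = true
    · have hpx : prioB "worst" x = 4 := by rw [prio_worst, if_pos hx]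
      rw [List.filter_cons_of_pos (by simp [hpx]), findInterA, if_pos hx, findInterA, if_pos hx]
    · by_cases hx0 : (0:Int) ≤ prioB "worst" x
      · rw [List.filter_cons_of_pos (by simpa using hx0), findInterA, if_neg hx,
          findInterA, if_neg hx, ih]
      · rw [List.filter_cons_of_neg (by simpa using hx0), findInterA, if_neg hx, ih]

-- ===== VERDICT (by name: the statement is the Claim_ definition above) =====
theorem choose_ann_entry_spec : Claim_equal_choose_ann_entry := by
  intro ann_list mode _
  unfold Spec_choose_ann_entry choose_ann_entry choose_ann_entry_alt
  by_cases h1 : (mode == "first") = true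
  · have hm : mode = "first" := by simpa using h1
    subst hm
    rcases ann_list with _ | ⟨a, t⟩
    · simp
    · have hne : (a :: t) ≠ ([] : List String) := by simp
      have hf : List.filter (fun e => decide (0 ≤ prioB "first" e)) (a :: t) = a :: t :=
        List.filter_eq_self.mpr (fun e _ => by simp [prio_first])
      rw [if_neg hne, if_pos (by decide : (("first" : String) == "first") = true),
        if_neg (by decide :
          ¬ ((("first" : String) == "first" || ("first" : String) == "canonical" ||
              ("first" : String) == "worst") = false)),
        hf, if_neg hne, max?_eq_foldl_mstep, List.foldl_cons,
        show mstep (prioB "first") none a = some a from rfl,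
        foldl_mstep_const t a _ (fun e _ => by simp [prio_first])]
      simp [PySem.List.pyGet?, PySem.List.pyIdx?]
  · have h1' : mode ≠ "first" := by simpa using h1
    by_cases h2 : (mode == "canonical") = true
    · have hm : mode = "canonical" := by simpa using h2
      subst hm
      rcases ann_list with _ | ⟨a, t⟩
      · simp
      · have hne : (a :: t) ≠ ([] : List String) := by simp
        have hf : List.filter (fun e => decide (0 ≤ prioB "canonical" e)) (a :: t) = a :: t :=
          List.filter_eq_self.mpr (fun e _ => by rw [prio_canon]; split_ifs <;> simp)
        rw [if_neg hne,
          if_neg (by decide : ¬ ((("canonical" : String) == "first") = true)),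
          if_pos (by decide : (("canonical" : String) == "canonical") = true),
          if_neg (by decide :
            ¬ ((("canonical" : String) == "first" || ("canonical" : String) == "canonical" ||
                ("canonical" : String) == "worst") = false)),
          hf, if_neg hne, max?_eq_foldl_mstep, List.foldl_cons,
          show mstep (prioB "canonical") none a = some a from rfl]
        by_cases ha : PySem.Str.isIn "CANONICAL" (splitAnnEntry a).2.2 = true
        · have hpa : prioB "canonical" a = 1 := by rw [prio_canon, if_pos ha]
          rw [foldl_mstep_const t a _ (fun e _ => by rw [hpa]; exact prio_canon_le_one e),
            findCanonA, if_pos ha]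
        · have hpa : prioB "canonical" a = 0 := by rw [prio_canon, if_neg ha]
          rw [canon_fold t a hpa, findCanonA, if_neg ha]
          cases findCanonA t <;> simp [PySem.List.pyGet?, PySem.List.pyIdx?]
    · have h2' : mode ≠ "canonical" := by simpa using h2
      by_cases h3 : (mode == "worst") = true
      · have hm : mode = "worst" := by simpa using h3
        subst hm
        rcases ann_list with _ | ⟨a, t⟩
        · simp
        · have hne : (a :: t) ≠ ([] : List String) := by simp
          rw [if_neg hne,
            if_neg (by decide : ¬ ((("worst" : String) == "first") = true)),
            if_neg (by decide : ¬ ((("worst" : String) == "canonical") = true)),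
            if_pos (by decide : (("worst" : String) == "worst") = true),
            if_neg (by decide :
              ¬ ((("worst" : String) == "first" || ("worst" : String) == "canonical" ||
                  ("worst" : String) == "worst") = false))]
          cases hfi : findInterA (a :: t) with
          | some e =>
            have hcf : findInterA (List.filter (fun e => decide (0 ≤ prioB "worst" e)) (a :: t)) = some e := by
              rw [findInterA_filter]; exact hfi
            have hne2 : List.filter (fun e => decide (0 ≤ prioB "worst" e)) (a :: t) ≠ [] := by
              intro hc; rw [hc] at hcf; simp [findInterA] at hcf
            rw [if_neg hne2, max?_eq_foldl_mstep]
            rcases hfl : List.filter (fun e => decide (0 ≤ prioB "worst" e)) (a :: t) with _ | ⟨b, s⟩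
            · exact absurd hfl hne2
            · rw [hfl] at hcf
              show some e = List.foldl (mstep (prioB "worst")) none (b :: s)
              rw [List.foldl_cons, show mstep (prioB "worst") none b = some b from rfl]
              by_cases hb : ((splitAnnEntry b).1 == "intergenic_region") = true
              · rw [findInterA, if_pos hb] at hcf
                injection hcf with hbe
                subst hbe
                rw [foldl_mstep_const s b _ (fun y _ => by
                  rw [show prioB "worst" b = 4 from by rw [prio_worst, if_pos hb]]
                  exact prio_worst_le_four y)]
              · rw [findInterA, if_neg hb] at hcf
                have hpb : prioB "worst" b < 4 := by
                  rw [prio_worst, if_neg hb]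
                  exact lt_of_le_of_lt (rank_bounds _).2 (by omega)
                rw [worst_fold_inter s b hpb e hcf]
          | none =>
            have hni := (findInterA_none_iff (a :: t)).mp hfi
            by_cases hfe : List.filter (fun e => decide (0 ≤ prioB "worst" e)) (a :: t) = []
            · rw [if_pos hfe, (worst_fold_best (a :: t) hni).2, hfe]
              rfl
            · rw [if_neg hfe, max?_eq_foldl_mstep, (worst_fold_best (a :: t) hni).2]
      · have h3' : mode ≠ "worst" := by simpa using h3
        simp [h1', h2', h3']
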